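-- pv_equiv track=rewrite | github.com/Rishov-NightKING/PrompEngineeringAPR | utils.py | heuristic_remove_code_explanation_at_the_end
-- ===== SOURCE A (Python) =====
-- def heuristic_remove_code_explanation_at_the_end(line):
--     end_words = [
--         "Explanation :",
--         "Note :",
--         "Reasoning :",
--         "In the refactored code",
--         "The refactored code",
--         "Changes made :",
--         "Changes Made :",
--         "Refactored Review :",
--     ]
--     for end_word in end_words:
--         line = line.split(end_word)[0]
--
--     return line.strip()
-- ===== SOURCE B (Python) =====
-- def heuristic_remove_code_explanation_at_the_end(line):
--     markers = (
--         "Explanation :",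
--         "Note :",
--         "Reasoning :",
--         "In the refactored code",
--         "The refactored code",
--         "Changes made :",
--         "Changes Made :",
--         "Refactored Review :",
--     )
--     # single left-to-right scan: stop at the first position where any marker starts
--     for i in range(len(line)):
--         if line.startswith(markers, i):
--             return line[:i].strip()
--     return line.strip()
-- ===== Notes on version B (the rewrite author's own statement) =====
-- stated objective: alternative
-- what changed: Replaces eight sequential split-and-reassign passes (each rescanning and reassembling the line) with a single left-to-right scan that stops at the first position where any marker starts and slices once; sound because no marker occurrence can straddle another's cut (no proper nonempty suffix of a marker is prefix-comparable with another marker).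
import Mathlib
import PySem

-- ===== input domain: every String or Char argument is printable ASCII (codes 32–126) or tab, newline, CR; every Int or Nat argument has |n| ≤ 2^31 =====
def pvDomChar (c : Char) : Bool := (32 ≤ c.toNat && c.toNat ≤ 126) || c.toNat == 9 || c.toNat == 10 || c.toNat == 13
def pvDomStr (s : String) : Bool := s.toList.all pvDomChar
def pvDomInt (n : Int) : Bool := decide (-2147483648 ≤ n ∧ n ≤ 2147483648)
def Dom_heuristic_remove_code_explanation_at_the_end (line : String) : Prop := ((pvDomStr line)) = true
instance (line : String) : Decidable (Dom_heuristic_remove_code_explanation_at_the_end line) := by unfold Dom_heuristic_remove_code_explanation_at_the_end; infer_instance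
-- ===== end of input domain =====

-- B replaces A's eight sequential split-and-reassign passes with one left-to-right scan that
-- truncates at the first position where any marker starts (objective: alternative decomposition).


-- ===== PORT A =====
-- the end_words list shared verbatim by both Pythons
def pvEndWords : List (List Char) :=
  ["Explanation :".toList, "Note :".toList, "Reasoning :".toList,
   "In the refactored code".toList, "The refactored code".toList,
   "Changes made :".toList, "Changes Made :".toList, "Refactored Review :".toList]

-- A: for each end_word, line = line.split(end_word)[0]; split(sep) is never empty, so [0] = headD
def heuristic_remove_code_explanation_at_the_end (line : String) : String :=
  String.ofList (PySem.Chars.strip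
    (pvEndWords.foldl (fun l w => (PySem.Chars.splitOn l w).headD []) line.toList))

-- ===== PORT B =====
-- B's scan: 'for i in range(len(line)): if line.startswith(markers, i): return line[:i].strip()'
-- realised as structural recursion building the kept prefix position by position
def pvScan (ws : List (List Char)) (cs : List Char) : List Char :=
  match cs with
  | [] => []
  | c :: rest => if ws.any (fun w => w.isPrefixOf (c :: rest)) then []
                 else c :: pvScan ws rest

def heuristic_remove_code_explanation_at_the_end_alt (line : String) : String :=
  String.ofList (PySem.Chars.strip (pvScan pvEndWords line.toList))

-- ===== PRECONDITION & SPEC =====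
def Spec_heuristic_remove_code_explanation_at_the_end (line : String) (out : String) : Prop := out = heuristic_remove_code_explanation_at_the_end_alt line
instance (line : String) (out : String) : Decidable (Spec_heuristic_remove_code_explanation_at_the_end line out) := by unfold Spec_heuristic_remove_code_explanation_at_the_end; infer_instance

-- ===== CLAIM (what is proved, stated in full; the proofs are below) =====
def Claim_equal_heuristic_remove_code_explanation_at_the_end : Prop := ∀ (line : String), Dom_heuristic_remove_code_explanation_at_the_end line → Spec_heuristic_remove_code_explanation_at_the_end line (heuristic_remove_code_explanation_at_the_end line)

-- ===== LEMMAS AND PROOFS =====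

-- head of Python's split(sep): the prefix of l before the first occurrence of w (all of l if none)
def pvCut1 (w l : List Char) : List Char :=
  match l with
  | [] => []
  | c :: rest => if w.isPrefixOf (c :: rest) then [] else c :: pvCut1 w rest

-- no occurrence of w can straddle a cut made at an occurrence of w':
-- no proper nonempty suffix of w is prefix-comparable with w'
def PvOv (w w' : List Char) : Prop :=
  ∀ k, k < w.length → 0 < k → ¬ (w.drop k <+: w') ∧ ¬ (w' <+: w.drop k)

lemma pvOv_drop_one {w w' : List Char} (h : PvOv w w') : PvOv (w.drop 1) w' := by
  intro k hk hk0
  rw [List.length_drop] at hk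
  have := h (k + 1) (by omega) (by omega)
  simpa [List.drop_drop] using this

-- splitOn.go ignores its accumulator up to prepending it (reversed)
lemma pvGo_acc (sep : List Char) :
    ∀ (fuel : Nat) (l cur : List Char) (acc : List (List Char)),
      PySem.Chars.splitOn.go sep fuel l cur acc
        = acc.reverse ++ PySem.Chars.splitOn.go sep fuel l cur [] := by
  intro fuel
  induction fuel with
  | zero => intro l cur acc; simp [PySem.Chars.splitOn.go]
  | succ n ih =>
    intro l cur acc
    cases l with
    | nil => simp [PySem.Chars.splitOn.go]
    | cons c rest =>
      simp only [PySem.Chars.splitOn.go]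
      by_cases h : sep.isPrefixOf (c :: rest)
      · simp only [h, if_true]
        rw [ih _ _ (cur.reverse :: acc), ih _ _ [cur.reverse]]
        simp
      · rw [if_neg h, if_neg h]
        exact ih _ _ acc

-- head of splitOn.go with empty accumulator
lemma pvGo_head (sep : List Char) :
    ∀ (fuel : Nat) (l cur : List Char), l.length ≤ fuel →
      (PySem.Chars.splitOn.go sep fuel l cur []).headD [] = cur.reverse ++ pvCut1 sep l := by
  intro fuel
  induction fuel with
  | zero =>
    intro l cur hl
    have : l = [] := List.length_eq_zero_iff.mp (Nat.le_zero.mp hl)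
    subst this
    simp [PySem.Chars.splitOn.go, pvCut1]
  | succ n ih =>
    intro l cur hl
    cases l with
    | nil => simp [PySem.Chars.splitOn.go, pvCut1]
    | cons c rest =>
      simp only [PySem.Chars.splitOn.go]
      by_cases h : sep.isPrefixOf (c :: rest)
      · simp only [h, if_true]
        rw [pvGo_acc]
        simp [pvCut1, h]
      · rw [if_neg h]
        rw [ih rest (c :: cur) (by simpa using Nat.lt_succ_iff.mp (by simpa using hl))]
        simp [pvCut1, h]

-- (split l w)[0] is the prefix of l before the first occurrence of w
lemma pvSplitOn_head (l w : List Char) :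
    (PySem.Chars.splitOn l w).headD [] = pvCut1 w l := by
  have := pvGo_head w (l.length + 1) l [] (by omega)
  simpa [PySem.Chars.splitOn] using this

lemma pvScan_nil (s : List Char) : pvScan [] s = s := by
  induction s with
  | nil => rfl
  | cons c rest ih => simp [pvScan, ih]

lemma pvScan_prefix (ws : List (List Char)) (s : List Char) : pvScan ws s <+: s := by
  induction s with
  | nil => simp [pvScan]
  | cons c rest ih =>
    simp only [pvScan]
    split
    · exact List.nil_prefix
    · exact (List.cons_prefix_cons).mpr ⟨rfl, ih⟩

-- if w occurs at the front of s and cannot straddle any ws-cut, it survives the ws-scan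
lemma pvPrefix_pvScan (ws : List (List Char)) :
    ∀ (s w : List Char), (∀ w' ∈ ws, PvOv w w') → (∀ w' ∈ ws, ¬ w' <+: s) →
      w <+: s → w <+: pvScan ws s := by
  intro s
  induction s with
  | nil => intro w _ _ h; simpa [pvScan] using h
  | cons c rest ih =>
    intro w hov h0 hpre
    have hany : ws.any (fun w' => w'.isPrefixOf (c :: rest)) = false := by
      simp only [List.any_eq_false]
      intro w' hw'
      simpa [List.isPrefixOf_iff_prefix] using h0 w' hw'
    simp [pvScan, hany]
    cases w with
    | nil => exact List.nil_prefix
    | cons a wt =>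
      obtain ⟨hac, hwt⟩ := List.cons_prefix_cons.mp hpre
      subst hac
      refine List.cons_prefix_cons.mpr ⟨rfl, ?_⟩
      cases wt with
      | nil => exact List.nil_prefix
      | cons b wt' =>
        refine ih (b :: wt') (fun w' hw' => pvOv_drop_one (hov w' hw')) ?_ hwt
        intro w' hw' hcon
        rcases List.prefix_or_prefix_of_prefix hwt hcon with hc | hc
        · exact ((hov w' hw') 1 (by simp) (by omega)).1 (by simpa using hc)
        · exact ((hov w' hw') 1 (by simp) (by omega)).2 (by simpa using hc)

-- cutting at w after the ws-scan equals scanning with ws ++ [w]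
lemma pvCut1_pvScan (ws : List (List Char)) (w : List Char)
    (hov : ∀ w' ∈ ws, PvOv w w') :
    ∀ s, pvCut1 w (pvScan ws s) = pvScan (ws ++ [w]) s := by
  intro s
  induction s with
  | nil => simp [pvScan, pvCut1]
  | cons c rest ih =>
    by_cases hany : ws.any (fun w' => w'.isPrefixOf (c :: rest)) = true
    · simp [pvScan, hany, pvCut1]
    · have hanyf : ws.any (fun w' => w'.isPrefixOf (c :: rest)) = false :=
        Bool.of_not_eq_true hany
      have hno : ∀ w' ∈ ws, ¬ w' <+: (c :: rest) := by
        intro w' hw'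
        have := List.any_eq_false.mp hanyf w' hw'
        simpa [List.isPrefixOf_iff_prefix] using this
      have hscan : pvScan ws (c :: rest) = c :: pvScan ws rest := by
        simp only [pvScan]
        rw [if_neg hany]
      by_cases hw0 : w <+: (c :: rest)
      · have hsurv : w <+: pvScan ws (c :: rest) :=
          pvPrefix_pvScan ws (c :: rest) w hov hno hw0
        rw [hscan] at hsurv
        have hL : pvCut1 w (c :: pvScan ws rest) = [] := by
          simp [pvCut1, List.isPrefixOf_iff_prefix, hsurv]
        have hR : pvScan (ws ++ [w]) (c :: rest) = [] := by
          have hcond : (ws ++ [w]).any (fun w' => w'.isPrefixOf (c :: rest)) = true := by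
            simp only [List.any_append, List.any_cons, List.any_nil, Bool.or_eq_true]
            exact Or.inr (Or.inl (by simpa [List.isPrefixOf_iff_prefix] using hw0))
          simp [pvScan, hcond]
        rw [hscan, hL, hR]
      · have hnot : ¬ w <+: (c :: pvScan ws rest) := by
          intro h
          exact hw0 (h.trans (List.cons_prefix_cons.mpr ⟨rfl, pvScan_prefix ws rest⟩))
        have hRany : ¬ (ws ++ [w]).any (fun w' => w'.isPrefixOf (c :: rest)) = true := by
          simp only [List.any_append, List.any_cons, List.any_nil, Bool.or_eq_true]
          rintro (h | h | h)
          · exact hany h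
          · exact hw0 (by simpa [List.isPrefixOf_iff_prefix] using h)
          · exact absurd h (by simp)
        rw [hscan]
        simp only [pvCut1, pvScan]
        rw [if_neg (by simpa [List.isPrefixOf_iff_prefix] using hnot), if_neg hRany]
        rw [ih]

-- the whole sequential-split pipeline equals the one-pass scan, given pairwise no-straddle
lemma pvFoldl_pvScan :
    ∀ (ws : List (List Char)), List.Pairwise (fun a b => PvOv b a) ws →
      ∀ s, ws.foldl (fun l w => pvCut1 w l) s = pvScan ws s := by
  intro ws
  induction ws using List.reverseRecOn with
  | nil => intro _ s; simp [pvScan_nil]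
  | append_singleton l w ih =>
    intro hp s
    rw [List.pairwise_append] at hp
    rw [List.foldl_append]
    simp only [List.foldl_cons, List.foldl_nil]
    rw [ih hp.1 s]
    exact pvCut1_pvScan l w (fun w' hw' => hp.2.2 w' hw' w (by simp)) s

set_option maxHeartbeats 1000000 in
lemma pvEndWords_pairwise : List.Pairwise (fun a b => PvOv b a) pvEndWords := by
  unfold pvEndWords PvOv
  decide

-- ===== VERDICT (by name: the statement is the Claim_ definition above) =====
theorem heuristic_remove_code_explanation_at_the_end_spec : Claim_equal_heuristic_remove_code_explanation_at_the_end := by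
  intro line _
  unfold Spec_heuristic_remove_code_explanation_at_the_end
  unfold heuristic_remove_code_explanation_at_the_end heuristic_remove_code_explanation_at_the_end_alt
  have hfun : (fun l w => (PySem.Chars.splitOn l w).headD ([] : List Char))
      = (fun l w => pvCut1 w l) := by
    funext l w; exact pvSplitOn_head l w
  rw [hfun, pvFoldl_pvScan pvEndWords pvEndWords_pairwise]
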